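-- pv_equiv track=rewrite | github.com/Muneer320/Class-Timetable | scripts/fetch_timetable.py | _map_group_day_columns
-- ===== SOURCE A (Python) =====
-- from typing import List, Dict, Optional, Tuple
--
-- def _map_group_day_columns(
--     raw_data: List[List[str]], group_row: int, day_row: int
-- ) -> Dict[str, List[Tuple[int, str]]]:
--     """
--     Build a mapping of group -> list of (column_index, day_name).
--     Robust to spacing and varying empty columns.
--     """
--     days = ["Monday", "Tuesday", "Wednesday", "Thursday", "Friday"]
--     day_row_vals = raw_data[day_row] if day_row < len(raw_data) else []
--     group_row_vals = raw_data[group_row] if group_row < len(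
--         raw_data) else []
--
--     # Find starting column for each group
--     group_starts: Dict[str, int] = {}
--     for idx, val in enumerate(group_row_vals):
--         sval = str(val)
--         if "Group A" in sval:
--             group_starts["A"] = idx
--         elif "Group B" in sval:
--             group_starts["B"] = idx
--         elif "Group C" in sval:
--             group_starts["C"] = idx
--
--     # Determine an upper bound for each group's section (next group's start or end of row)
--     ordered_groups = [(g, group_starts[g]) for g in sorted(
--         group_starts.keys(), key=lambda k: group_starts[k])]
--     section_bounds: Dict[str, Tuple[int, int]] = {}
--     for i, (g, start) in enumerate(ordered_groups):
--         end = len(day_row_vals)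
--         if i + 1 < len(ordered_groups):
--             end = ordered_groups[i + 1][1]
--         section_bounds[g] = (start, end)
--
--     # For each group, pick the columns where the day headers match
--     group_cols: Dict[str, List[Tuple[int, str]]] = {
--         g: [] for g in group_starts.keys()}
--     for g, (start, end) in section_bounds.items():
--         used = set()
--         for d in days:
--             # Find the next occurrence of this day within the group's section
--             found_col = None
--             for c in range(start, end):
--                 if c in used:
--                     continue
--                 if c < len(day_row_vals) and str(day_row_vals[c]).strip() == d:
--                     found_col = c
--                     break
--             if found_col is not None:
--                 used.add(found_col)
--                 group_cols[g].append((found_col, d))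
--
--     return group_cols
-- ===== SOURCE B (Python) =====
-- from typing import List, Dict, Optional, Tuple
--
-- def _map_group_day_columns(
--     raw_data: List[List[str]], group_row: int, day_row: int
-- ) -> Dict[str, List[Tuple[int, str]]]:
--     """
--     Build a mapping of group -> list of (column_index, day_name).
--     A start->end successor table replaces the ordered-groups bounds pass, and a
--     single column sweep per section builds a day -> first-column table which is
--     then emitted in weekday order.
--     """
--     days = ["Monday", "Tuesday", "Wednesday", "Thursday", "Friday"]
--     day_row_vals = raw_data[day_row] if day_row < len(raw_data) else []
--     group_row_vals = raw_data[group_row] if group_row < len(raw_data) else []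
--
--     # Starting column for each group (last occurrence wins)
--     group_starts: Dict[str, int] = {}
--     for idx, val in enumerate(group_row_vals):
--         sval = str(val)
--         for pat, g in (("Group A", "A"), ("Group B", "B"), ("Group C", "C")):
--             if pat in sval:
--                 group_starts[g] = idx
--                 break
--
--     # Each section ends where the next one (in column order) starts
--     starts = sorted(group_starts.values())
--     ends: Dict[int, int] = dict(zip(starts, starts[1:] + [len(day_row_vals)]))
--
--     result: Dict[str, List[Tuple[int, str]]] = {}
--     for g, start in group_starts.items():
--         # one sweep over the section: day header -> first column showing it
--         day_col: Dict[str, int] = {}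
--         for c in range(start, min(ends[start], len(day_row_vals))):
--             v = str(day_row_vals[c]).strip()
--             if v in days and v not in day_col:
--                 day_col[v] = c
--         result[g] = [(day_col[d], d) for d in days if d in day_col]
--     return result
-- ===== Notes on version B (the rewrite author's own statement) =====
-- stated objective: alternative
-- what changed: The ordered-groups/section-bounds pass is replaced by a start->next-start successor table over the sorted start columns, and the per-day rescans with a used-set are replaced by one first-occurrence sweep per section building a day->column table emitted in weekday order.
import Mathlib
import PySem

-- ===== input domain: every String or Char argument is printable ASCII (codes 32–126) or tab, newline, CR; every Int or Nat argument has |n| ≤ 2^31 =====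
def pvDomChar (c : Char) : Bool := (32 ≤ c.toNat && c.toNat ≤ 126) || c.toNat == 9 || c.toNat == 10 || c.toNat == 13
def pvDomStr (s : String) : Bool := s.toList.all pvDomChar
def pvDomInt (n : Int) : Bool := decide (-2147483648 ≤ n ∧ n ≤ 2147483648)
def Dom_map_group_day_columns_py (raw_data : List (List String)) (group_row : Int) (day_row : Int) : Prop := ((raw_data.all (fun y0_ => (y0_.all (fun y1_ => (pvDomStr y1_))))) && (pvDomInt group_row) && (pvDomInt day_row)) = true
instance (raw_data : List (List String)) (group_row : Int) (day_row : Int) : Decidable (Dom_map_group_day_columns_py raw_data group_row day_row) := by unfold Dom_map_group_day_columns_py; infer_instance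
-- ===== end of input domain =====

-- One honest line: B replaces the ordered-groups bounds pass and the per-day rescans with a
-- used-set by a start->next-start successor table and one first-occurrence sweep per section
-- (objective: alternative, same cost class).

def pvDays : List String := ["Monday", "Tuesday", "Wednesday", "Thursday", "Friday"]

-- the local `v = str(day_row_vals[c]).strip()` of B's sweep
def stripAt (vals : List String) (c : Int) : String :=
  PySem.Str.strip (PySem.List.pyGetD vals c "")

-- ===== PORT A =====
def aGroupStarts (grv : List String) : PySem.Dict String Int :=
  (PySem.List.enumerate grv 0).foldl (fun gs p =>
    if PySem.Str.isIn "Group A" p.2 then gs.insert "A" p.1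
    else if PySem.Str.isIn "Group B" p.2 then gs.insert "B" p.1
    else if PySem.Str.isIn "Group C" p.2 then gs.insert "C" p.1
    else gs) PySem.Dict.empty

def aOrdered (gs : PySem.Dict String Int) : List (String × Int) :=
  (PySem.List.sorted gs.keys (fun k => gs.getD k 0) false).map (fun g => (g, gs.getD g 0))

def aSectionBounds (ordered : List (String × Int)) (lenvals : Int) : PySem.Dict String (Int × Int) :=
  (PySem.List.enumerate ordered 0).foldl (fun sb ip =>
    sb.insert ip.2.1 (ip.2.2,
      if ip.1 + 1 < (ordered.length : Int)
      then (PySem.List.pyGetD ordered (ip.1 + 1) ("", 0)).2 else lenvals)) PySem.Dict.empty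

-- the inner `for c in range(start, end): … break` loop (first match wins)
def aFindCol (vals : List String) (used : PySem.Set Int) (s e : Int) (d : String) : Option Int :=
  (PySem.List.pyRange s e 1).find? (fun c =>
    !(PySem.Set.contains used c) && (decide (c < (vals.length : Int)) &&
      (PySem.Str.strip (PySem.List.pyGetD vals c "") == d)))

-- the `for d in days:` loop of one section, threading (used, group_cols)
def aDayLoop (vals : List String) (s e : Int) (g : String)
    (st : PySem.Set Int × PySem.Dict String (List (Int × String))) (ds : List String) :
    PySem.Set Int × PySem.Dict String (List (Int × String)) :=
  ds.foldl (fun st d =>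
    match aFindCol vals st.1 s e d with
    | some c => (PySem.Set.add st.1 c, st.2.modify g [] (fun l => l ++ [(c, d)]))
    | none => st) st

def map_group_day_columns_py (raw_data : List (List String)) (group_row : Int) (day_row : Int) : List (String × List (Int × String)) :=
  let n : Int := raw_data.length
  let dvals := if day_row < n then (PySem.List.pyGet? raw_data day_row).getD [] else []
  let gvals := if group_row < n then (PySem.List.pyGet? raw_data group_row).getD [] else []
  let gs := aGroupStarts gvals
  let ordered := aOrdered gs
  let sb := aSectionBounds ordered (dvals.length : Int)
  let init := gs.keys.foldl (fun d g => d.insert g ([] : List (Int × String))) PySem.Dict.empty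
  let fin := sb.items.foldl (fun d p =>
      (aDayLoop dvals p.2.1 p.2.2 p.1 (PySem.Set.empty, d) pvDays).2) init
  fin.items

-- ===== PORT B =====
def bGroupStarts (grv : List String) : PySem.Dict String Int :=
  (PySem.List.enumerate grv 0).foldl (fun gs p =>
    match [("Group A", "A"), ("Group B", "B"), ("Group C", "C")].find?
        (fun pg => PySem.Str.isIn pg.1 p.2) with
    | some pg => gs.insert pg.2 p.1
    | none => gs) PySem.Dict.empty

-- one sweep of a section's columns: day header -> first column showing it
def bDayCol (vals : List String) (s e : Int) : PySem.Dict String Int :=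
  (PySem.List.pyRange s (min e (vals.length : Int)) 1).foldl (fun dc c =>
    if pvDays.contains (stripAt vals c) && !(dc.contains (stripAt vals c))
    then dc.insert (stripAt vals c) c else dc) PySem.Dict.empty

def map_group_day_columns_py_alt (raw_data : List (List String)) (group_row : Int) (day_row : Int) : List (String × List (Int × String)) :=
  let n : Int := raw_data.length
  let dvals := if day_row < n then (PySem.List.pyGet? raw_data day_row).getD [] else []
  let gvals := if group_row < n then (PySem.List.pyGet? raw_data group_row).getD [] else []
  let gs := bGroupStarts gvals
  let starts := PySem.List.sorted gs.values (fun x => x) false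
  let ends := PySem.Dict.ofList (starts.zip (starts.drop 1 ++ [(dvals.length : Int)]))
  let res := gs.items.foldl (fun r p =>
      r.insert p.1 (pvDays.filterMap (fun d =>
        ((bDayCol dvals p.2 (ends.getD p.2 0)).get? d).map (fun c => (c, d))))) PySem.Dict.empty
  res.items

-- ===== PRECONDITION & SPEC =====
-- Pre_ excludes exactly the inputs where the Python raises IndexError: a negative row index
-- below -len(raw_data) (both phases index raw_data[row] whenever row < len(raw_data)).
def Pre_map_group_day_columns_py (raw_data : List (List String)) (group_row : Int) (day_row : Int) : Prop :=
  -(raw_data.length : Int) ≤ group_row ∧ -(raw_data.length : Int) ≤ day_row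
instance (raw_data : List (List String)) (group_row : Int) (day_row : Int) : Decidable (Pre_map_group_day_columns_py raw_data group_row day_row) := by unfold Pre_map_group_day_columns_py; infer_instance

def pvWitness_map_group_day_columns_py : List (List String) × Int × Int :=
  ([["Group A", "", "Group B"], ["Monday", "Tuesday", "Monday", "Friday"]], 0, 1)

def Spec_map_group_day_columns_py (raw_data : List (List String)) (group_row : Int) (day_row : Int) (out : List (String × List (Int × String))) : Prop := out = map_group_day_columns_py_alt raw_data group_row day_row
instance (raw_data : List (List String)) (group_row : Int) (day_row : Int) (out : List (String × List (Int × String))) : Decidable (Spec_map_group_day_columns_py raw_data group_row day_row out) := by unfold Spec_map_group_day_columns_py; infer_instance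

-- ===== CLAIM (what is proved, stated in full; the proofs are below) =====
def Claim_equal_map_group_day_columns_py : Prop := ∀ (raw_data : List (List String)) (group_row : Int) (day_row : Int), Dom_map_group_day_columns_py raw_data group_row day_row → Pre_map_group_day_columns_py raw_data group_row day_row → Spec_map_group_day_columns_py raw_data group_row day_row (map_group_day_columns_py raw_data group_row day_row)

-- ===== LEMMAS AND PROOFS =====

-- proof-side vocabulary
def firstCol (vals : List String) (s e : Int) (d : String) : Option Int :=
  (PySem.List.pyRange s (min e (vals.length : Int)) 1).find? (fun c => stripAt vals c == d)

def sect (vals : List String) (s e : Int) : List (Int × String) :=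
  pvDays.filterMap (fun d => (firstCol vals s e d).map (fun c => (c, d)))

-- the pure emission of A's per-section day loop
def aEmit (vals : List String) (used : PySem.Set Int) (s e : Int) : List String → List (Int × String)
  | [] => []
  | d :: ds =>
    match aFindCol vals used s e d with
    | some c => (c, d) :: aEmit vals (PySem.Set.add used c) s e ds
    | none => aEmit vals used s e ds

theorem find?_congr_mem {α : Type} (l : List α) (p q : α → Bool)
    (h : ∀ c ∈ l, p c = q c) : l.find? p = l.find? q := by
  induction l with
  | nil => rfl
  | cons x xs ih =>
      simp only [List.find?_cons, h x (by simp)]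
      cases q x <;> simp [ih (fun c hc => h c (by simp [hc]))]

theorem find?_clamp (vals : List String) (s e : Int) (P : Int → Bool) :
    (PySem.List.pyRange s e 1).find?
      (fun c => decide (c < (vals.length : Int)) && P c) =
    (PySem.List.pyRange s (min e (vals.length : Int)) 1).find? P := by
  rcases le_or_gt e (vals.length : Int) with h | h
  · rw [min_eq_left h]
    apply find?_congr_mem
    intro c hc
    have hce := (PySem.List.mem_pyRange_one.mp hc).2
    simp [lt_of_lt_of_le hce h]
  · rcases le_or_gt s (vals.length : Int) with hs | hs
    · rw [min_eq_right h.le,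
        PySem.List.pyRange_one_append s (vals.length : Int) e hs h.le, List.find?_append]
      have h1 : (PySem.List.pyRange s (vals.length : Int) 1).find?
          (fun c => decide (c < (vals.length : Int)) && P c) =
          (PySem.List.pyRange s (vals.length : Int) 1).find? P := by
        apply find?_congr_mem
        intro c hc
        simp [(PySem.List.mem_pyRange_one.mp hc).2]
      have h2 : (PySem.List.pyRange (vals.length : Int) e 1).find?
          (fun c => decide (c < (vals.length : Int)) && P c) = none := by
        rw [List.find?_eq_none]
        intro c hc
        simp [not_lt.mpr (PySem.List.mem_pyRange_one.mp hc).1]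
      rw [h1, h2, Option.or_none]
    · rw [min_eq_right h.le, PySem.List.pyRange_one_eq_nil hs.le]
      rw [List.find?_nil, List.find?_eq_none]
      intro c hc
      have := (PySem.List.mem_pyRange_one.mp hc).1
      simp [not_lt.mpr (le_trans hs.le this)]

theorem aFindCol_eq_firstCol (vals : List String) (used : PySem.Set Int) (s e : Int) (d : String)
    (h : ∀ c ∈ used, stripAt vals c ≠ d) :
    aFindCol vals used s e d = firstCol vals s e d := by
  unfold aFindCol firstCol
  rw [← find?_clamp]
  apply find?_congr_mem
  intro c _
  by_cases hc : c ∈ used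
  · have h1 : PySem.Set.contains used c = true := (PySem.Set.contains_iff used c).mpr hc
    have h2 : (PySem.Str.strip (PySem.List.pyGetD vals c "") == d) = false := by
      simpa [stripAt] using h c hc
    simp [h1, stripAt, h2]
  · have h1 : PySem.Set.contains used c = false :=
      Bool.eq_false_iff.mpr (fun hh => hc ((PySem.Set.contains_iff used c).mp hh))
    simp [stripAt]
    exact fun _ _ => hc

theorem aEmit_eq_filterMap (vals : List String) (s e : Int) (ds : List String)
    (used : PySem.Set Int) (hnd : ds.Nodup)
    (h : ∀ c ∈ used, stripAt vals c ∉ ds) :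
    aEmit vals used s e ds = ds.filterMap (fun d => (firstCol vals s e d).map (fun c => (c, d))) := by
  induction ds generalizing used with
  | nil => rfl
  | cons d ds ih =>
    obtain ⟨hd, hnds⟩ := List.nodup_cons.mp hnd
    have hne : ∀ c ∈ used, stripAt vals c ≠ d := by
      intro c hc hEq
      exact h c hc (by simp [hEq])
    rw [aEmit, aFindCol_eq_firstCol vals used s e d hne]
    cases hfc : firstCol vals s e d with
    | none =>
        rw [List.filterMap_cons, hfc]
        exact ih used hnds (fun c hc hmem => h c hc (by simp [hmem]))
    | some c =>
        have hstrip : stripAt vals c = d := by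
          have := List.find?_some hfc
          simpa using this
        rw [List.filterMap_cons, hfc]
        simp only [Option.map_some]
        congr 1
        apply ih (PySem.Set.add used c) hnds
        intro c' hc' hmem
        rcases (PySem.Set.mem_add used c c').mp hc' with hold | hnew
        · exact h c' hold (by simp [hmem])
        · subst hnew
          rw [hstrip] at hmem
          exact hd hmem

theorem aDayLoop_items (vals : List String) (s e : Int) (g : String) (ds : List String)
    (used : PySem.Set Int) (dd : PySem.Dict String (List (Int × String)))
    (hg : g ∈ dd.keys) (hnd : dd.keys.Nodup) :
    (aDayLoop vals s e g (used, dd) ds).2.items =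
      dd.items.map (fun q => if q.1 = g then (q.1, q.2 ++ aEmit vals used s e ds) else q) := by
  induction ds generalizing used dd with
  | nil =>
    have h0 : ∀ q ∈ dd.items,
        (if q.1 = g then (q.1, q.2 ++ aEmit vals used s e []) else q) = q := by
      intro q _
      rw [aEmit]
      split <;> simp
    rw [List.map_congr_left h0]
    simp [aDayLoop]
  | cons day ds ih =>
    cases hfc : aFindCol vals used s e day with
    | none =>
      have hstep : aDayLoop vals s e g (used, dd) (day :: ds) =
          aDayLoop vals s e g (used, dd) ds := by
        simp only [aDayLoop, List.foldl_cons, hfc]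
      rw [hstep, ih used dd hg hnd]
      apply List.map_congr_left
      intro q _
      have : aEmit vals used s e (day :: ds) = aEmit vals used s e ds := by
        rw [aEmit, hfc]
      rw [this]
    | some c =>
      have hcont : dd.contains g = true := (PySem.Dict.contains_iff_mem_keys dd g).mpr hg
      have hmodeq : dd.modify g [] (fun l => l ++ [(c, day)]) =
          dd.insert g (dd.getD g [] ++ [(c, day)]) := rfl
      have hmod : (dd.modify g [] (fun l => l ++ [(c, day)])).items
          = dd.items.map (fun p => if (p.1 == g) = true then (g, dd.getD g [] ++ [(c, day)]) else p) := by
        rw [hmodeq]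
        exact PySem.Dict.items_insert_of_contains dd _ hcont
      have hkeysmod : (dd.modify g [] (fun l => l ++ [(c, day)])).keys = dd.keys := by
        rw [hmodeq]
        exact PySem.Dict.keys_insert_of_contains dd _ hcont
      have hstep : aDayLoop vals s e g (used, dd) (day :: ds) =
          aDayLoop vals s e g (PySem.Set.add used c, dd.modify g [] (fun l => l ++ [(c, day)])) ds := by
        simp only [aDayLoop, List.foldl_cons, hfc]
      rw [hstep, ih (PySem.Set.add used c) _ (hkeysmod ▸ hg) (by rw [hkeysmod]; exact hnd),
        hmod, List.map_map]
      apply List.map_congr_left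
      intro q hq
      simp only [Function.comp_apply, beq_iff_eq]
      by_cases hq1 : q.1 = g
      · have hqv : q.2 = dd.getD g [] := by
          have : (g, q.2) ∈ dd.items := by
            rw [← hq1]
            exact hq
          exact (PySem.Dict.getD_of_mem_items dd this hnd []).symm
        have hEmit : aEmit vals used s e (day :: ds) =
            (c, day) :: aEmit vals (PySem.Set.add used c) s e ds := by
          rw [aEmit, hfc]
        simp [hq1, hqv, hEmit]
      · simp [hq1]

theorem aDayLoop_keys (vals : List String) (s e : Int) (g : String) (ds : List String)
    (used : PySem.Set Int) (dd : PySem.Dict String (List (Int × String)))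
    (hg : g ∈ dd.keys) (hnd : dd.keys.Nodup) :
    (aDayLoop vals s e g (used, dd) ds).2.keys = dd.keys := by
  have h := aDayLoop_items vals s e g ds used dd hg hnd
  have hk : (aDayLoop vals s e g (used, dd) ds).2.keys
      = (aDayLoop vals s e g (used, dd) ds).2.items.map Prod.fst := rfl
  have hk2 : dd.keys = dd.items.map Prod.fst := rfl
  rw [hk, h, List.map_map, hk2]
  apply List.map_congr_left
  intro q _
  simp only [Function.comp_apply]
  split <;> rfl

theorem phase3_items (vals : List String)
    (us : List (String × Int × Int)) (dd : PySem.Dict String (List (Int × String)))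
    (hnd : dd.keys.Nodup) (hus : (us.map Prod.fst).Nodup)
    (hin : ∀ u ∈ us, u.1 ∈ dd.keys) :
    (us.foldl (fun d p => (aDayLoop vals p.2.1 p.2.2 p.1 (PySem.Set.empty, d) pvDays).2) dd).items =
      dd.items.map (fun q =>
        match us.find? (fun u => u.1 == q.1) with
        | some u => (q.1, q.2 ++ aEmit vals PySem.Set.empty u.2.1 u.2.2 pvDays)
        | none => q) := by
  induction us generalizing dd with
  | nil =>
    simp only [List.foldl_nil, List.find?_nil]
    have h0 : ∀ q ∈ dd.items,
        (match (none : Option (String × Int × Int)) with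
         | some u => (q.1, q.2 ++ aEmit vals PySem.Set.empty u.2.1 u.2.2 pvDays)
         | none => q) = q := by
      intro q _
      rfl
    rw [List.map_congr_left h0]
    simp
  | cons u us ih =>
    have hg : u.1 ∈ dd.keys := hin u (by simp)
    have hitems := aDayLoop_items vals u.2.1 u.2.2 u.1 pvDays PySem.Set.empty dd hg hnd
    have hkeys := aDayLoop_keys vals u.2.1 u.2.2 u.1 pvDays PySem.Set.empty dd hg hnd
    simp only [List.foldl_cons]
    rw [ih _ (by rw [hkeys]; exact hnd) (List.nodup_cons.mp hus).2
      (fun u' hu' => by rw [hkeys]; exact hin u' (by simp [hu'])), hitems, List.map_map]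
    apply List.map_congr_left
    intro q hq
    simp only [Function.comp_apply]
    by_cases hq1 : q.1 = u.1
    · rw [List.find?_cons_of_pos (by simp [hq1])]
      have hnone : us.find? (fun u' => u'.1 == q.1) = none := by
        rw [List.find?_eq_none]
        intro x hx hpx
        apply (List.nodup_cons.mp hus).1
        have : x.1 = q.1 := by simpa using hpx
        rw [← hq1, ← this]
        exact List.mem_map.mpr ⟨x, hx, rfl⟩
      rw [hq1] at hnone
      simp [hq1, hnone]
    · rw [List.find?_cons_of_neg (by simp; exact fun hh => hq1 hh.symm)]
      simp [hq1]

theorem dayColFold_get? (vals : List String) (cs : List Int) (dc0 : PySem.Dict String Int)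
    (d : String) (hd : d ∈ pvDays) :
    (cs.foldl (fun dc c =>
      if pvDays.contains (stripAt vals c) && !(dc.contains (stripAt vals c))
      then dc.insert (stripAt vals c) c else dc) dc0).get? d =
    (dc0.get? d).or (cs.find? (fun c => stripAt vals c == d)) := by
  induction cs generalizing dc0 with
  | nil => simp
  | cons c cs ih =>
    simp only [List.foldl_cons]
    rw [ih]
    by_cases hv : stripAt vals c = d
    · rw [hv]
      by_cases hcont : dc0.contains d = true
      · have hcondF : (pvDays.contains d && !(dc0.contains d)) = false := by
          rw [hcont]
          simp
        rw [hcondF]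
        rw [if_neg (by simp)]
        obtain ⟨x, hx⟩ : ∃ x, dc0.get? d = some x := by
          cases hg : dc0.get? d with
          | none => exact absurd ((PySem.Dict.get?_eq_none_iff_contains dc0 d).mp hg) (by simp [hcont])
          | some x => exact ⟨x, rfl⟩
        rw [hx]
        simp
      · have hcd : pvDays.contains d = true := by
          simpa using hd
        have hcontF : dc0.contains d = false := Bool.eq_false_iff.mpr hcont
        rw [if_pos (by rw [hcd, hcontF]; rfl)]
        rw [PySem.Dict.get?_insert_self]
        have h0 : dc0.get? d = none := (PySem.Dict.get?_eq_none_iff_contains dc0 d).mpr hcontF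
        rw [h0, List.find?_cons_of_pos (by simp [hv])]
        simp
    · have hne : d ≠ stripAt vals c := fun hh => hv hh.symm
      have hget : (if pvDays.contains (stripAt vals c) && !(dc0.contains (stripAt vals c))
          then dc0.insert (stripAt vals c) c else dc0).get? d = dc0.get? d := by
        split
        · exact PySem.Dict.get?_insert_of_ne _ _ hne
        · rfl
      rw [hget, List.find?_cons_of_neg (by simp [hv])]

theorem bDayCol_get? (vals : List String) (s e : Int) (d : String) (hd : d ∈ pvDays) :
    (bDayCol vals s e).get? d = firstCol vals s e d := by
  unfold bDayCol firstCol
  rw [dayColFold_get? vals _ PySem.Dict.empty d hd]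
  simp

theorem bGroupStarts_eq (grv : List String) : bGroupStarts grv = aGroupStarts grv := by
  unfold bGroupStarts aGroupStarts
  congr 1
  funext gs p
  cases h1 : PySem.Str.isIn "Group A" p.2 <;>
    cases h2 : PySem.Str.isIn "Group B" p.2 <;>
      cases h3 : PySem.Str.isIn "Group C" p.2 <;>
        simp only [List.find?_cons, h1, h2, h3] <;> rfl

theorem aGS_nodup_aux (l : List (Int × String)) (gs : PySem.Dict String Int)
    (h : gs.keys.Nodup) :
    (l.foldl (fun gs p =>
      if PySem.Str.isIn "Group A" p.2 then gs.insert "A" p.1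
      else if PySem.Str.isIn "Group B" p.2 then gs.insert "B" p.1
      else if PySem.Str.isIn "Group C" p.2 then gs.insert "C" p.1
      else gs) gs).keys.Nodup := by
  induction l generalizing gs with
  | nil => exact h
  | cons p l ih =>
    simp only [List.foldl_cons]
    apply ih
    repeat' split
    all_goals first
      | exact PySem.Dict.nodup_keys_insert _ _ _ h
      | exact h

theorem aGroupStarts_keys_nodup (grv : List String) : (aGroupStarts grv).keys.Nodup := by
  unfold aGroupStarts
  apply aGS_nodup_aux
  decide

theorem aGS_inj_aux (l : List (Int × String)) (gs : PySem.Dict String Int)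
    (hl : l.Pairwise (fun p q => p.1 < q.1))
    (hb : ∀ k ∈ gs.keys, ∀ p ∈ l, gs.getD k 0 < p.1)
    (hinj : ∀ k1 ∈ gs.keys, ∀ k2 ∈ gs.keys, k1 ≠ k2 → gs.getD k1 0 ≠ gs.getD k2 0) :
    ∀ k1 ∈ (l.foldl (fun gs p =>
      if PySem.Str.isIn "Group A" p.2 then gs.insert "A" p.1
      else if PySem.Str.isIn "Group B" p.2 then gs.insert "B" p.1
      else if PySem.Str.isIn "Group C" p.2 then gs.insert "C" p.1
      else gs) gs).keys,
    ∀ k2 ∈ (l.foldl (fun gs p =>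
      if PySem.Str.isIn "Group A" p.2 then gs.insert "A" p.1
      else if PySem.Str.isIn "Group B" p.2 then gs.insert "B" p.1
      else if PySem.Str.isIn "Group C" p.2 then gs.insert "C" p.1
      else gs) gs).keys,
      k1 ≠ k2 →
        (l.foldl (fun gs p =>
          if PySem.Str.isIn "Group A" p.2 then gs.insert "A" p.1
          else if PySem.Str.isIn "Group B" p.2 then gs.insert "B" p.1
          else if PySem.Str.isIn "Group C" p.2 then gs.insert "C" p.1
          else gs) gs).getD k1 0 ≠
        (l.foldl (fun gs p =>
          if PySem.Str.isIn "Group A" p.2 then gs.insert "A" p.1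
          else if PySem.Str.isIn "Group B" p.2 then gs.insert "B" p.1
          else if PySem.Str.isIn "Group C" p.2 then gs.insert "C" p.1
          else gs) gs).getD k2 0 := by
  induction l generalizing gs with
  | nil => exact hinj
  | cons p l ih =>
    obtain ⟨hhead, htail⟩ := List.pairwise_cons.mp hl
    simp only [List.foldl_cons]
    have hstep : ∀ (K : String),
        (∀ k ∈ (gs.insert K p.1).keys, ∀ q ∈ l, (gs.insert K p.1).getD k 0 < q.1) ∧
        (∀ k1 ∈ (gs.insert K p.1).keys, ∀ k2 ∈ (gs.insert K p.1).keys,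
          k1 ≠ k2 → (gs.insert K p.1).getD k1 0 ≠ (gs.insert K p.1).getD k2 0) := by
      intro K
      constructor
      · intro k hk q hq
        rw [PySem.Dict.getD_insert]
        split
        · exact hhead q hq
        · rcases (PySem.Dict.mem_keys_insert _ _ _ _).mp hk with hEq | hmem
          · simp_all
          · exact hb k hmem q (by simp [hq])
      · intro k1 hk1 k2 hk2 hne
        rw [PySem.Dict.getD_insert, PySem.Dict.getD_insert]
        by_cases e1 : k1 = K
        · rw [if_pos e1, if_neg (fun hh : k2 = K => hne (e1.trans hh.symm))]
          rcases (PySem.Dict.mem_keys_insert _ _ _ _).mp hk2 with hEq | hmem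
          · exact absurd (e1.trans hEq.symm) hne
          · exact (ne_of_gt (hb k2 hmem p (by simp)))
        · rw [if_neg e1]
          by_cases e2 : k2 = K
          · rw [if_pos e2]
            rcases (PySem.Dict.mem_keys_insert _ _ _ _).mp hk1 with hEq | hmem
            · exact absurd (hEq.trans e2.symm) hne
            · exact (ne_of_lt (hb k1 hmem p (by simp)))
          · rw [if_neg e2]
            rcases (PySem.Dict.mem_keys_insert _ _ _ _).mp hk1 with hEq | hm1
            · exact absurd hEq e1
            · rcases (PySem.Dict.mem_keys_insert _ _ _ _).mp hk2 with hEq | hm2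
              · exact absurd hEq e2
              · exact hinj k1 hm1 k2 hm2 hne
    have hbtail : ∀ k ∈ gs.keys, ∀ q ∈ l, gs.getD k 0 < q.1 := by
      intro k hk q hq
      exact hb k hk q (by simp [hq])
    split
    · exact ih _ htail (hstep "A").1 (hstep "A").2
    · split
      · exact ih _ htail (hstep "B").1 (hstep "B").2
      · split
        · exact ih _ htail (hstep "C").1 (hstep "C").2
        · exact ih _ htail hbtail hinj

theorem aGroupStarts_inj (grv : List String) :
    ∀ k1 ∈ (aGroupStarts grv).keys, ∀ k2 ∈ (aGroupStarts grv).keys,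
      k1 ≠ k2 → (aGroupStarts grv).getD k1 0 ≠ (aGroupStarts grv).getD k2 0 := by
  unfold aGroupStarts
  apply aGS_inj_aux
  · have h1 : (PySem.List.enumerate grv 0).map Prod.fst = PySem.List.pyRange 0 (0 + grv.length) 1 :=
      PySem.List.map_fst_enumerate grv 0
    have h2 : ((PySem.List.enumerate grv 0).map Prod.fst).Pairwise (· < ·) := by
      rw [h1]
      exact PySem.List.pairwise_lt_pyRange_one 0 _
    exact (List.pairwise_map.mp h2)
  · intro k hk
    simp [PySem.Dict.keys, PySem.Dict.empty] at hk
  · intro k1 hk1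
    simp [PySem.Dict.keys, PySem.Dict.empty] at hk1

theorem ofList_items_of_nodup {κ ν : Type} [BEq κ] [LawfulBEq κ] (l : List (κ × ν))
    (h : (l.map Prod.fst).Nodup) : (PySem.Dict.ofList l).items = l := by
  have := PySem.Dict.items_foldl_insert_fresh l Prod.fst Prod.snd PySem.Dict.empty
    (by intro a _; rfl) h
  simpa using this

theorem find?_eq_of_mem {κ : Type} [BEq κ] [LawfulBEq κ] {ν : Type} (l : List (κ × ν))
    (h : (l.map Prod.fst).Nodup) (g : κ) (x : ν) (hm : (g, x) ∈ l) :
    l.find? (fun u => u.1 == g) = some (g, x) := by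
  induction l with
  | nil => simp at hm
  | cons y l ih =>
    rcases List.mem_cons.mp hm with hy | hl
    · rw [← hy]
      rw [List.find?_cons_of_pos (by simp)]
    · have hg : g ∈ l.map Prod.fst := by
        exact List.mem_map.mpr ⟨(g, x), hl, rfl⟩
      have hy1 : y.1 ≠ g := by
        intro hEq
        exact (List.nodup_cons.mp h).1 (hEq ▸ hg)
      rw [List.find?_cons_of_neg (by simp [hy1])]
      exact ih (List.nodup_cons.mp h).2 hl

-- ===== MAIN ASSEMBLY =====

theorem pvDays_nodup : pvDays.Nodup := by decide

theorem ordered_perm_items (gs : PySem.Dict String Int) (hknd : gs.keys.Nodup) :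
    (aOrdered gs).Perm gs.items := by
  unfold aOrdered
  rw [PySem.Dict.items_eq_map_keys gs hknd 0]
  exact List.Perm.map _ (PySem.List.sorted_perm gs.keys (fun k => gs.getD k 0) false)

theorem ordered_fst (gs : PySem.Dict String Int) :
    (aOrdered gs).map Prod.fst = PySem.List.sorted gs.keys (fun k => gs.getD k 0) false := by
  unfold aOrdered
  rw [List.map_map]
  rw [show (Prod.fst ∘ fun g => (g, gs.getD g 0)) = id from rfl, List.map_id]

theorem ordered_snd_pairwise (gs : PySem.Dict String Int) (hknd : gs.keys.Nodup)
    (hinj : ∀ k1 ∈ gs.keys, ∀ k2 ∈ gs.keys, k1 ≠ k2 → gs.getD k1 0 ≠ gs.getD k2 0) :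
    ((aOrdered gs).map Prod.snd).Pairwise (· < ·) := by
  unfold aOrdered
  rw [List.map_map]
  have hsknd : (PySem.List.sorted gs.keys (fun k => gs.getD k 0) false).Nodup :=
    (PySem.List.sorted_perm gs.keys (fun k => gs.getD k 0) false).nodup_iff.mpr hknd
  have hle := PySem.List.sorted_pairwise gs.keys (fun k => gs.getD k 0)
  have hcomb := hle.and hsknd
  rw [List.pairwise_map]
  apply hcomb.imp_of_mem
  intro a b ha hb hab
  have hamem : a ∈ gs.keys := (PySem.List.sorted_perm gs.keys _ false).subset ha
  have hbmem : b ∈ gs.keys := (PySem.List.sorted_perm gs.keys _ false).subset hb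
  exact lt_of_le_of_ne hab.1 (hinj a hamem b hbmem hab.2)

theorem starts_eq (gs : PySem.Dict String Int) (hknd : gs.keys.Nodup)
    (hinj : ∀ k1 ∈ gs.keys, ∀ k2 ∈ gs.keys, k1 ≠ k2 → gs.getD k1 0 ≠ gs.getD k2 0) :
    PySem.List.sorted gs.values (fun x => x) false = (aOrdered gs).map Prod.snd := by
  apply PySem.List.sorted_eq_of_perm_of_pairwise_lt
  · exact List.Perm.map _ (ordered_perm_items gs hknd)
  · exact ordered_snd_pairwise gs hknd hinj

theorem sb_items (ordered : List (String × Int)) (lenvals : Int)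
    (h : (ordered.map Prod.fst).Nodup) :
    (aSectionBounds ordered lenvals).items =
      (PySem.List.enumerate ordered 0).map (fun ip => (ip.2.1, (ip.2.2,
        if ip.1 + 1 < (ordered.length : Int)
        then (PySem.List.pyGetD ordered (ip.1 + 1) ("", 0)).2 else lenvals))) := by
  unfold aSectionBounds
  have hmap : (PySem.List.enumerate ordered 0).map (fun ip => ip.2.1) = ordered.map Prod.fst := by
    rw [show (fun (ip : Int × String × Int) => ip.2.1) = (Prod.fst ∘ Prod.snd) from rfl,
      ← List.map_map, PySem.List.map_snd_enumerate]
  have hfresh := PySem.Dict.items_foldl_insert_fresh (PySem.List.enumerate ordered 0)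
    (fun ip => ip.2.1)
    (fun ip => (ip.2.2, if ip.1 + 1 < (ordered.length : Int)
      then (PySem.List.pyGetD ordered (ip.1 + 1) ("", 0)).2 else lenvals))
    PySem.Dict.empty (fun a _ => rfl) (by rw [hmap]; exact h)
  simpa using hfresh

theorem init_items (gs : PySem.Dict String Int) (h : gs.keys.Nodup) :
    (gs.keys.foldl (fun d g => d.insert g ([] : List (Int × String))) PySem.Dict.empty).items
      = gs.keys.map (fun g => (g, ([] : List (Int × String)))) := by
  have hfresh := PySem.Dict.items_foldl_insert_fresh gs.keys (fun g => g)
    (fun _ => ([] : List (Int × String))) PySem.Dict.empty (fun a _ => rfl)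
    (by simpa using h)
  simpa using hfresh

theorem bres_items (dvals : List String) (gs : PySem.Dict String Int) (ends : PySem.Dict Int Int)
    (h : gs.keys.Nodup) :
    (gs.items.foldl (fun r p =>
        r.insert p.1 (pvDays.filterMap (fun d =>
          ((bDayCol dvals p.2 (ends.getD p.2 0)).get? d).map (fun c => (c, d))))) PySem.Dict.empty).items
      = gs.items.map (fun p => (p.1, pvDays.filterMap (fun d =>
          ((bDayCol dvals p.2 (ends.getD p.2 0)).get? d).map (fun c => (c, d))))) := by
  have hfresh := PySem.Dict.items_foldl_insert_fresh gs.items Prod.fst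
    (fun p => pvDays.filterMap (fun d =>
      ((bDayCol dvals p.2 (ends.getD p.2 0)).get? d).map (fun c => (c, d))))
    PySem.Dict.empty (fun a _ => rfl) h
  simpa using hfresh

theorem ends_getD (starts : List Int) (lenvals : Int) (hnd : starts.Nodup)
    (i : Nat) (hi : i < starts.length) :
    (PySem.Dict.ofList (starts.zip (starts.drop 1 ++ [lenvals]))).getD (starts[i]) 0 =
      if i + 1 < starts.length then (starts[i + 1]?).getD 0 else lenvals := by
  have hL1 : 1 ≤ starts.length := by omega
  have hlen2 : (starts.drop 1 ++ [lenvals]).length = starts.length := by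
    simp [List.length_drop]
    omega
  have hfst : (starts.zip (starts.drop 1 ++ [lenvals])).map Prod.fst = starts :=
    List.map_fst_zip (by rw [hlen2])
  have hitems : (PySem.Dict.ofList (starts.zip (starts.drop 1 ++ [lenvals]))).items
      = starts.zip (starts.drop 1 ++ [lenvals]) :=
    ofList_items_of_nodup _ (by rw [hfst]; exact hnd)
  have hziplen : i < (starts.zip (starts.drop 1 ++ [lenvals])).length := by
    rw [List.length_zip, hlen2]
    omega
  have hmem : (starts[i], (starts.drop 1 ++ [lenvals])[i]'(by omega)) ∈
      starts.zip (starts.drop 1 ++ [lenvals]) := by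
    have := List.getElem_zip (l := starts) (l' := starts.drop 1 ++ [lenvals]) (i := i) (h := hziplen)
    rw [← this]
    exact List.getElem_mem _
  have hmem' : (starts[i], (starts.drop 1 ++ [lenvals])[i]'(by omega)) ∈
      (PySem.Dict.ofList (starts.zip (starts.drop 1 ++ [lenvals]))).items := by
    rw [hitems]
    exact hmem
  have hval := PySem.Dict.getD_of_mem_items _ hmem' (PySem.Dict.nodup_keys_ofList _) 0
  rw [hval]
  by_cases h2 : i + 1 < starts.length
  · rw [if_pos h2]
    have hdl : i < (starts.drop 1).length := by
      simp only [List.length_drop]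
      omega
    rw [List.getElem_append_left hdl, List.getElem_drop, List.getElem?_eq_getElem h2]
    simp [Nat.add_comm]
  · rw [if_neg h2]
    have hdl : (starts.drop 1).length ≤ i := by
      simp only [List.length_drop]
      omega
    rw [List.getElem_append_right hdl]
    simp

theorem sb_fst (ordered : List (String × Int)) (lenvals : Int)
    (h : (ordered.map Prod.fst).Nodup) :
    (aSectionBounds ordered lenvals).items.map Prod.fst = ordered.map Prod.fst := by
  rw [sb_items ordered lenvals h, List.map_map]
  have hh : ((Prod.fst ∘ fun (ip : Int × String × Int) => (ip.2.1, (ip.2.2,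
      if ip.1 + 1 < (ordered.length : Int)
      then (PySem.List.pyGetD ordered (ip.1 + 1) ("", 0)).2 else lenvals))) : Int × String × Int → String)
      = (fun ip => ip.2.1) := rfl
  rw [hh, show (fun (ip : Int × String × Int) => ip.2.1) = (Prod.fst ∘ Prod.snd) from rfl,
    ← List.map_map, PySem.List.map_snd_enumerate]

theorem sb_fst_nodup (ordered : List (String × Int)) (lenvals : Int)
    (h : (ordered.map Prod.fst).Nodup) :
    ((aSectionBounds ordered lenvals).items.map Prod.fst).Nodup := by
  rw [sb_fst ordered lenvals h]
  exact h

theorem sb_entry_mem (ordered : List (String × Int)) (lenvals : Int)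
    (h : (ordered.map Prod.fst).Nodup) (i : Nat) (hi : i < ordered.length) :
    ((ordered[i]).1, ((ordered[i]).2,
      if i + 1 < ordered.length then ((ordered[i + 1]?).getD ("", 0)).2 else lenvals)) ∈
      (aSectionBounds ordered lenvals).items := by
  rw [sb_items ordered lenvals h]
  apply List.mem_map.mpr
  refine ⟨((i : Int), ordered[i]), ?_, ?_⟩
  · rw [PySem.List.enumerate_eq_map_pyRange ordered ("", 0)]
    apply List.mem_map.mpr
    refine ⟨(i : Int), ?_, ?_⟩
    · rw [PySem.List.mem_pyRange_one]
      constructor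
      · exact Int.natCast_nonneg i
      · simpa using hi
    · rw [PySem.List.pyGetD_eq_getElem ordered ("", 0) (Int.natCast_nonneg i) (by simpa using hi)]
      simp
  · simp only []
    by_cases h2 : i + 1 < ordered.length
    · rw [if_pos (by push_cast; omega), if_pos h2]
      rw [show ((i : Int) + 1) = ((i + 1 : Nat) : Int) from by push_cast; ring]
      rw [PySem.List.pyGetD_eq_getElem ordered ("", 0) (Int.natCast_nonneg (i+1)) (by exact_mod_cast h2)]
      rw [List.getElem?_eq_getElem h2]
      simp
    · rw [if_neg (by push_cast; omega), if_neg h2]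


theorem core_eq (dvals gvals : List String) :
    ((aSectionBounds (aOrdered (aGroupStarts gvals)) (dvals.length : Int)).items.foldl
        (fun d p => (aDayLoop dvals p.2.1 p.2.2 p.1 (PySem.Set.empty, d) pvDays).2)
        ((aGroupStarts gvals).keys.foldl
          (fun d g => d.insert g ([] : List (Int × String))) PySem.Dict.empty)).items
    =
    ((aGroupStarts gvals).items.foldl (fun r p =>
        r.insert p.1 (pvDays.filterMap (fun d =>
          ((bDayCol dvals p.2
            ((PySem.Dict.ofList ((PySem.List.sorted (aGroupStarts gvals).values (fun x => x) false).zip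
              ((PySem.List.sorted (aGroupStarts gvals).values (fun x => x) false).drop 1 ++
                [(dvals.length : Int)]))).getD p.2 0)).get? d).map (fun c => (c, d)))))
      PySem.Dict.empty).items := by
  have hknd : (aGroupStarts gvals).keys.Nodup := aGroupStarts_keys_nodup gvals
  have hinj := aGroupStarts_inj gvals
  have hOP : (aOrdered (aGroupStarts gvals)).Perm (aGroupStarts gvals).items :=
    ordered_perm_items _ hknd
  have hOFnodup : ((aOrdered (aGroupStarts gvals)).map Prod.fst).Nodup := by
    rw [ordered_fst]
    exact (PySem.List.sorted_perm (aGroupStarts gvals).keys _ false).nodup_iff.mpr hknd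
  have hOS := ordered_snd_pairwise _ hknd hinj
  have hOSnodup : ((aOrdered (aGroupStarts gvals)).map Prod.snd).Nodup :=
    List.Pairwise.imp (fun h => ne_of_lt h) hOS
  rw [starts_eq _ hknd hinj]
  have hII := init_items _ hknd
  have hIK : ((aGroupStarts gvals).keys.foldl
      (fun d g => d.insert g ([] : List (Int × String))) PySem.Dict.empty).keys
      = (aGroupStarts gvals).keys := by
    rw [show ((aGroupStarts gvals).keys.foldl
        (fun d g => d.insert g ([] : List (Int × String))) PySem.Dict.empty).keys
      = ((aGroupStarts gvals).keys.foldl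
        (fun d g => d.insert g ([] : List (Int × String))) PySem.Dict.empty).items.map Prod.fst
      from rfl, hII, List.map_map]
    rw [show (Prod.fst ∘ fun g => (g, ([] : List (Int × String)))) = id from rfl, List.map_id]
  have hin : ∀ u ∈ (aSectionBounds (aOrdered (aGroupStarts gvals)) (dvals.length : Int)).items,
      u.1 ∈ (aGroupStarts gvals).keys := by
    intro u hu
    have h1 : u.1 ∈ (aSectionBounds (aOrdered (aGroupStarts gvals))
        (dvals.length : Int)).items.map Prod.fst := List.mem_map.mpr ⟨u, hu, rfl⟩
    rw [sb_fst _ _ hOFnodup] at h1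
    have h2 : ((aOrdered (aGroupStarts gvals)).map Prod.fst).Perm
        ((aGroupStarts gvals).items.map Prod.fst) := hOP.map Prod.fst
    exact h2.subset h1
  rw [phase3_items dvals _ _ (by rw [hIK]; exact hknd) (sb_fst_nodup _ _ hOFnodup)
    (fun u hu => by rw [hIK]; exact hin u hu), hII, List.map_map,
    bres_items dvals _ _ hknd, PySem.Dict.items_eq_map_keys _ hknd 0, List.map_map]
  apply List.map_congr_left
  intro g hg
  simp only [Function.comp_apply]
  have hgmem : (g, (aGroupStarts gvals).getD g 0) ∈ aOrdered (aGroupStarts gvals) :=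
    hOP.mem_iff.mpr (by
      rw [PySem.Dict.items_eq_map_keys _ hknd 0]
      exact List.mem_map.mpr ⟨g, hg, rfl⟩)
  obtain ⟨i, hi, hEqi⟩ := List.getElem_of_mem hgmem
  have hmemsb := sb_entry_mem (aOrdered (aGroupStarts gvals)) (dvals.length : Int) hOFnodup i hi
  rw [hEqi] at hmemsb
  have hfind := find?_eq_of_mem _ (sb_fst_nodup _ _ hOFnodup) g _ hmemsb
  rw [hfind]
  dsimp only
  have hEm := aEmit_eq_filterMap dvals ((aGroupStarts gvals).getD g 0)
    (if i + 1 < (aOrdered (aGroupStarts gvals)).length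
      then (((aOrdered (aGroupStarts gvals))[i + 1]?).getD ("", 0)).2 else (dvals.length : Int))
    pvDays PySem.Set.empty pvDays_nodup (by intro c hc; simp [PySem.Set.empty] at hc)
  have hE := ends_getD ((aOrdered (aGroupStarts gvals)).map Prod.snd) (dvals.length : Int)
    hOSnodup i (by simpa using hi)
  have hsi : ((aOrdered (aGroupStarts gvals)).map Prod.snd)[i]'(by simpa using hi)
      = (aGroupStarts gvals).getD g 0 := by
    rw [List.getElem_map]
    rw [hEqi]
  rw [hsi] at hE
  have hEE : (PySem.Dict.ofList (((aOrdered (aGroupStarts gvals)).map Prod.snd).zip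
        (((aOrdered (aGroupStarts gvals)).map Prod.snd).drop 1 ++ [(dvals.length : Int)]))).getD
        ((aGroupStarts gvals).getD g 0) 0
      = (if i + 1 < (aOrdered (aGroupStarts gvals)).length
        then (((aOrdered (aGroupStarts gvals))[i + 1]?).getD ("", 0)).2
        else (dvals.length : Int)) := by
    rw [hE]
    by_cases h2 : i + 1 < (aOrdered (aGroupStarts gvals)).length
    · rw [if_pos (by simpa using h2), if_pos h2]
      rw [List.getElem?_map, List.getElem?_eq_getElem h2]
      simp
    · rw [if_neg (by simpa using h2), if_neg h2]
  rw [hEE, hEm]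
  have hfc : ∀ d ∈ pvDays,
      ((bDayCol dvals ((aGroupStarts gvals).getD g 0)
        (if i + 1 < (aOrdered (aGroupStarts gvals)).length
          then (((aOrdered (aGroupStarts gvals))[i + 1]?).getD ("", 0)).2
          else (dvals.length : Int))).get? d).map (fun c => (c, d)) =
      (firstCol dvals ((aGroupStarts gvals).getD g 0)
        (if i + 1 < (aOrdered (aGroupStarts gvals)).length
          then (((aOrdered (aGroupStarts gvals))[i + 1]?).getD ("", 0)).2
          else (dvals.length : Int)) d).map (fun c => (c, d)) := by
    intro d hd
    rw [bDayCol_get? _ _ _ d hd]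
  rw [List.filterMap_congr hfc]
  simp

-- ===== VERDICT (by name: the statement is the Claim_ definition above) =====
theorem map_group_day_columns_py_spec : Claim_equal_map_group_day_columns_py := by
  intro raw_data group_row day_row hdom hpre
  unfold Spec_map_group_day_columns_py
  simp only [map_group_day_columns_py, map_group_day_columns_py_alt]
  rw [bGroupStarts_eq]
  exact core_eq _ _
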